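-- pv_equiv track=rewrite | github.com/mylesfabre/stop-eating-animals | hw8pr2.py | markov_model
-- ===== SOURCE A (Python) =====
-- def markov_model(wordList, k):
--     markModel = {}
--     key = ('$',)*k
--     orig_key = ('$',)*k
--     for i in range(len(wordList)):
--         word = wordList[i]
--         if key not in markModel:
--             markModel[key]=[word]
--         else:
--             markModel[key]+=[word]
--         key = key[1:]+(word,)
--         if word[-1] in '.!?':
--             key = orig_key
--     return markModel
-- ===== SOURCE B (Python) =====
-- def markov_model(wordList, k):
--     # Phase 1: split the word stream into sentences at words ending in . ! ?
--     sentences = []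
--     current = []
--     for word in wordList:
--         current.append(word)
--         if word and word[-1] in '.!?':
--             sentences.append(current)
--             current = []
--     if current:
--         sentences.append(current)
--     # Phase 2: build the model sentence by sentence, key restarting each time
--     markModel = {}
--     start = ('$',) * k
--     for sentence in sentences:
--         key = start
--         for word in sentence:
--             markModel.setdefault(key, []).append(word)
--             key = key[1:] + (word,)
--     return markModel
-- ===== Notes on version B (the rewrite author's own statement) =====
-- stated objective: alternative
-- what changed: Replaces A's single interleaved loop with in-loop key resets by an explicit two-phase shape: first split the word list into sentences at words ending in '.!?', then build the model per sentence with setdefault, restarting the key at each sentence.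
import Mathlib
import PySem

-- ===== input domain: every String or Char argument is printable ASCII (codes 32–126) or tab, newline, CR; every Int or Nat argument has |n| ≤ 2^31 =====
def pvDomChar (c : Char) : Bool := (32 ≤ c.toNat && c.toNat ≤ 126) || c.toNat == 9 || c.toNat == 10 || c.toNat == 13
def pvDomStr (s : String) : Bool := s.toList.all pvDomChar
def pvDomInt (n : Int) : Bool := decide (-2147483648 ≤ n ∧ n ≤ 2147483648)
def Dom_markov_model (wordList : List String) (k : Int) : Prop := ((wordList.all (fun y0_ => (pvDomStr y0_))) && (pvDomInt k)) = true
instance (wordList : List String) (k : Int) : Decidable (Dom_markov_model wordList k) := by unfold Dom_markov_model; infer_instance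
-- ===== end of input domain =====

-- B replaces A's interleaved reset-in-loop by an explicit two-phase shape (split into
-- sentences, then build per sentence); equal return value on Pre_ (no empty-string words).

-- ===== PORT A =====

-- word[-1] in '.!?' ; `none` (Python: IndexError on the empty word) is excluded by Pre_
def mmLastIn (w : String) : Bool :=
  match PySem.Str.pyGet? w (-1) with
  | some c => c == '.' || c == '!' || c == '?'
  | none => false

def markov_model (wordList : List String) (k : Int) : List (List String × List String) :=
  let orig_key : List String := List.replicate k.toNat "$"
  let res := (PySem.List.pyRange 0 (wordList.length : Int) 1).foldl
    (fun (st : PySem.Dict (List String) (List String) × List String) i =>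
      let word := PySem.List.pyGetD wordList i ""
      let d := if st.1.contains st.2 = false
               then st.1.insert st.2 [word]
               else st.1.insert st.2 (st.1.getD st.2 [] ++ [word])
      let key := st.2.drop 1 ++ [word]
      let key := if mmLastIn word then orig_key else key
      (d, key))
    (PySem.Dict.empty, orig_key)
  res.1.items

-- ===== PORT B =====

-- phase 1: split the word stream into sentences at words ending in '.!?'
def mmSplit (wordList : List String) : List (List String) :=
  let p := wordList.foldl
    (fun (st : List (List String) × List String) word =>
      let cur := st.2 ++ [word]
      if (word != "") && mmLastIn word then (st.1 ++ [cur], ([] : List String))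
      else (st.1, cur))
    ([], [])
  if p.2 = [] then p.1 else p.1 ++ [p.2]

-- phase 2, one sentence: markModel.setdefault(key, []).append(word); key = key[1:]+(word,)
def mmBuild (start : List String) (d : PySem.Dict (List String) (List String))
    (sentence : List String) : PySem.Dict (List String) (List String) :=
  (sentence.foldl
    (fun (st : PySem.Dict (List String) (List String) × List String) word =>
      (st.1.modify st.2 [] (· ++ [word]), st.2.drop 1 ++ [word]))
    (d, start)).1

def markov_model_alt (wordList : List String) (k : Int) : List (List String × List String) :=
  let start : List String := List.replicate k.toNat "$"
  ((mmSplit wordList).foldl (mmBuild start) PySem.Dict.empty).items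

-- ===== PRECONDITION & SPEC =====
-- Pre_ excludes word lists containing the empty string, on which A raises IndexError (word[-1]).
def Pre_markov_model (wordList : List String) (k : Int) : Prop :=
  ∀ w ∈ wordList, w ≠ ""
instance (wordList : List String) (k : Int) : Decidable (Pre_markov_model wordList k) := by unfold Pre_markov_model; infer_instance

def pvWitness_markov_model : List String × Int := (["the", "cat", "sat."], 2)

def Spec_markov_model (wordList : List String) (k : Int) (out : List (List String × List String)) : Prop := out = markov_model_alt wordList k
instance (wordList : List String) (k : Int) (out : List (List String × List String)) : Decidable (Spec_markov_model wordList k out) := by unfold Spec_markov_model; infer_instance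

-- ===== CLAIM (what is proved, stated in full; the proofs are below) =====
def Claim_equal_markov_model : Prop := ∀ (wordList : List String) (k : Int), Dom_markov_model wordList k → Pre_markov_model wordList k → Spec_markov_model wordList k (markov_model wordList k)

-- ===== LEMMAS AND PROOFS =====

-- A's per-word step (dictionary update + key slide / reset)
def mmStepA (start : List String)
    (st : PySem.Dict (List String) (List String) × List String) (word : String) :
    PySem.Dict (List String) (List String) × List String :=
  let d := if st.1.contains st.2 = false
           then st.1.insert st.2 [word]
           else st.1.insert st.2 (st.1.getD st.2 [] ++ [word])
  let key := st.2.drop 1 ++ [word]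
  (d, if mmLastIn word then start else key)

-- B's inner (within-sentence) step
def mmStepI (st : PySem.Dict (List String) (List String) × List String) (word : String) :
    PySem.Dict (List String) (List String) × List String :=
  (st.1.modify st.2 [] (· ++ [word]), st.2.drop 1 ++ [word])

-- B's splitter step
def mmSplitStep (st : List (List String) × List String) (word : String) :
    List (List String) × List String :=
  let cur := st.2 ++ [word]
  if (word != "") && mmLastIn word then (st.1 ++ [cur], ([] : List String))
  else (st.1, cur)

def mmFinish (p : List (List String) × List String) : List (List String) :=
  if p.2 = [] then p.1 else p.1 ++ [p.2]

theorem mmBuild_eq (start : List String) (d : PySem.Dict (List String) (List String))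
    (s : List String) : mmBuild start d s = (s.foldl mmStepI (d, start)).1 := rfl

theorem mmPush_eq (d : PySem.Dict (List String) (List String)) (key : List String)
    (w : String) :
    (if d.contains key = false then d.insert key [w]
     else d.insert key (d.getD key [] ++ [w])) = d.modify key [] (· ++ [w]) := by
  have hm : d.modify key [] (· ++ [w]) = d.insert key (d.getD key [] ++ [w]) := rfl
  rw [hm]
  by_cases h : d.contains key = false
  · simp [h, PySem.Dict.getD_of_not_contains]
  · simp [h]

-- the splitter's accumulator is append-only
theorem mmSplitStep_acc (ws : List String) (acc : List (List String)) (cur : List String) :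
    ws.foldl mmSplitStep (acc, cur)
      = (acc ++ (ws.foldl mmSplitStep ([], cur)).1, (ws.foldl mmSplitStep ([], cur)).2) := by
  induction ws generalizing acc cur with
  | nil => simp
  | cons w ws ih =>
    simp only [List.foldl_cons]
    by_cases h : ((w != "") && mmLastIn w) = true
    · rw [show mmSplitStep (acc, cur) w = (acc ++ [cur ++ [w]], []) by simp [mmSplitStep, h],
        show mmSplitStep ([], cur) w = ([cur ++ [w]], []) by simp [mmSplitStep, h],
        ih (acc ++ [cur ++ [w]]) [], ih [cur ++ [w]] []]
      simp
    · rw [show mmSplitStep (acc, cur) w = (acc, cur ++ [w]) by simp [mmSplitStep, h],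
        show mmSplitStep ([], cur) w = ([], cur ++ [w]) by simp [mmSplitStep, h]]
      exact ih acc (cur ++ [w])

-- main invariant: A's fold, started from the state reached by building the pending
-- sentence prefix `cur`, equals B's split-then-build on the remaining words
theorem mmMain (start : List String) (ws : List String) :
    ∀ (cur : List String) (d : PySem.Dict (List String) (List String)),
    (∀ w ∈ ws, w ≠ "") → (∀ w ∈ cur, mmLastIn w = false) →
    (ws.foldl (mmStepA start) (cur.foldl mmStepI (d, start))).1
      = (mmFinish (ws.foldl mmSplitStep ([], cur))).foldl (mmBuild start) d := by
  induction ws with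
  | nil =>
    intro cur d _ _
    by_cases hc : cur = []
    · subst hc; simp [mmFinish]
    · simp [mmFinish, hc, mmBuild_eq]
  | cons w ws ih =>
    intro cur d hne hcur
    have hw : w ≠ "" := hne w (List.mem_cons_self ..)
    have hrest : ∀ w' ∈ ws, w' ≠ "" := fun w' h => hne w' (List.mem_cons_of_mem _ h)
    simp only [List.foldl_cons]
    by_cases ht : mmLastIn w = true
    · -- terminal word: sentence cur ++ [w] closes; key resets to start
      have hA : mmStepA start (cur.foldl mmStepI (d, start)) w
          = ((((cur ++ [w]).foldl mmStepI (d, start)).1), start) := by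
        simp only [mmStepA, ht, if_true, List.foldl_append, List.foldl_cons, List.foldl_nil,
          mmStepI]
        rw [mmPush_eq]
      have hS : mmSplitStep ([], cur) w = ([cur ++ [w]], []) := by
        simp [mmSplitStep, ht, hw]
      rw [hA, hS,
        show ((((cur ++ [w]).foldl mmStepI (d, start)).1), start)
            = ([] : List String).foldl mmStepI
                ((((cur ++ [w]).foldl mmStepI (d, start)).1), start) from rfl,
        ih [] _ hrest (by simp),
        mmSplitStep_acc ws [cur ++ [w]] []]
      simp only [mmFinish]
      by_cases h2 : (ws.foldl mmSplitStep ([], [])).2 = []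
      · simp [h2, mmBuild_eq]
      · simp [h2, mmBuild_eq]
    · -- non-terminal word: it joins the pending sentence prefix
      have hA : mmStepA start (cur.foldl mmStepI (d, start)) w
          = (cur ++ [w]).foldl mmStepI (d, start) := by
        simp only [mmStepA, ht, if_false, List.foldl_append, List.foldl_cons, List.foldl_nil,
          mmStepI, Bool.false_eq_true]
        rw [mmPush_eq]
      have hS : mmSplitStep ([], cur) w = ([], cur ++ [w]) := by
        simp [mmSplitStep, ht]
      rw [hA, hS]
      exact ih (cur ++ [w]) d hrest
        (by intro w' hw'; rcases List.mem_append.1 hw' with h | h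
            · exact hcur w' h
            · simp_all)

-- ===== VERDICT (by name: the statement is the Claim_ definition above) =====
theorem markov_model_spec : Claim_equal_markov_model := by
  intro wordList k _ hpre
  unfold Spec_markov_model
  show (List.foldl (fun acc j => mmStepA (List.replicate k.toNat "$") acc
          (PySem.List.pyGetD wordList j ""))
        (PySem.Dict.empty, List.replicate k.toNat "$")
        (PySem.List.pyRange 0 (wordList.length : Int) 1)).1.items
      = (List.foldl (mmBuild (List.replicate k.toNat "$")) PySem.Dict.empty
          (mmFinish (List.foldl mmSplitStep ([], []) wordList))).items
  rw [PySem.List.foldl_pyRange_zero_pyGetD' wordList ""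
    (mmStepA (List.replicate k.toNat "$"))
    (PySem.Dict.empty, List.replicate k.toNat "$")]
  have := mmMain (List.replicate k.toNat "$") wordList [] PySem.Dict.empty hpre (by simp)
  simp only [List.foldl_nil] at this
  rw [this]
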